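-- pv_equiv track=rewrite | github.com/Kartik-ins/CS367AI | LAB2/plagarism-check.py | sentence_alignment_cost
-- ===== SOURCE A (Python) =====
-- def edit_distance(word1, word2):
--     m = len(word1)
--     n = len(word2)
--     dp = [[0 for _ in range(n + 1)] for _ in range(m + 1)]
--
--     for i in range(m + 1):
--         for j in range(n + 1):
--             if i == 0:
--                 dp[i][j] = j
--             elif j == 0:
--                 dp[i][j] = i
--             elif word1[i - 1] == word2[j - 1]:
--                 dp[i][j] = dp[i - 1][j - 1]
--             else:
--                 dp[i][j] = 1 + min(dp[i - 1][j],
--                                    dp[i][j - 1],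
--                                    dp[i - 1][j - 1])
--     return dp[m][n]
--
-- def sentence_alignment_cost(sent1, sent2):
--     words1 = sent1.split(' ')
--     words2 = sent2.split(' ')
--     n = len(words1)
--     m = len(words2)
--     dp = [[0 for _ in range(n + 1)] for _ in range(m + 1)]
--
--     for i in range(m + 1):
--         for j in range(n + 1):
--             if i == 0 and j == 0:
--                 dp[i][j] = 0
--             elif i == 0:
--                 dp[i][j] = dp[i][j - 1] + len(words1[j - 1])
--             elif j == 0:
--                 dp[i][j] = dp[i - 1][j] + len(words2[i - 1])
--             else:
--                 cost_substitute = dp[i - 1][j - 1] + edit_distance(words2[i - 1], words1[j - 1])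
--                 cost_delete_w2 = dp[i - 1][j] + len(words2[i - 1])
--                 cost_delete_w1 = dp[i][j - 1] + len(words1[j - 1])
--                 dp[i][j] = min(cost_substitute, cost_delete_w2, cost_delete_w1)
--     return dp[m][n]
-- ===== SOURCE B (Python) =====
-- def edit_distance(word1, word2):
--     memo = {}
--     def go(i, j):
--         if i == 0:
--             return j
--         if j == 0:
--             return i
--         key = (i, j)
--         if key in memo:
--             return memo[key]
--         if word1[i - 1] == word2[j - 1]:
--             res = go(i - 1, j - 1)
--         else:
--             res = 1 + min(go(i - 1, j), go(i, j - 1), go(i - 1, j - 1))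
--         memo[key] = res
--         return res
--     return go(len(word1), len(word2))
--
-- def sentence_alignment_cost(sent1, sent2):
--     words1 = sent1.split(' ')
--     words2 = sent2.split(' ')
--     memo = {}
--     def solve(i, j):
--         if i == 0 and j == 0:
--             return 0
--         key = (i, j)
--         if key in memo:
--             return memo[key]
--         if i == 0:
--             res = solve(i, j - 1) + len(words1[j - 1])
--         elif j == 0:
--             res = solve(i - 1, j) + len(words2[i - 1])
--         else:
--             res = min(solve(i - 1, j - 1) + edit_distance(words2[i - 1], words1[j - 1]),
--                       solve(i - 1, j) + len(words2[i - 1]),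
--                       solve(i, j - 1) + len(words1[j - 1]))
--         memo[key] = res
--         return res
--     return solve(len(words2), len(words1))
-- ===== Notes on version B (the rewrite author's own statement) =====
-- stated objective: alternative
-- what changed: Both levels are rewritten from A's bottom-up fill of a preallocated (m+1)x(n+1) matrix by nested index loops into top-down memoized recursion: solve(i,j) over word-prefix pairs and go(i,j) over character-prefix pairs, each with a dict cache keyed by (i,j).
import Mathlib
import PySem

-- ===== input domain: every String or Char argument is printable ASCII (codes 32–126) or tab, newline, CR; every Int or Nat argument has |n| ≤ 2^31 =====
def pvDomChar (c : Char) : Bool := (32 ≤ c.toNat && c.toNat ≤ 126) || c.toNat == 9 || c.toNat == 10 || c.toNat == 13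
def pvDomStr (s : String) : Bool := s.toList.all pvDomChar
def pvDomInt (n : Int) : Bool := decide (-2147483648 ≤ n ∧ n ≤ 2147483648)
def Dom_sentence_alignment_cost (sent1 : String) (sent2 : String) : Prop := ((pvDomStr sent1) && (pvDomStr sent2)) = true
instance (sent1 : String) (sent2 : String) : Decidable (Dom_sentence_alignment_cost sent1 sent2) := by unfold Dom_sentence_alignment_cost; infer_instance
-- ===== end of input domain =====

-- B replaces A's bottom-up fill of preallocated (m+1)×(n+1) DP matrices (in both the outer word
-- alignment and the inner character edit distance) by top-down memoized recursion over prefix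
-- index pairs with a dict cache; objective: alternative decomposition (same asymptotic cost).

-- ===== PORT A =====
-- dp[i][j] read/write on the list-of-lists matrix (all indices are in range in A)
def pvGet2 (dp : List (List Int)) (i j : Int) : Int :=
  PySem.List.pyGetD (PySem.List.pyGetD dp i []) j 0

def pvSet2 (dp : List (List Int)) (i j : Int) (v : Int) : List (List Int) :=
  PySem.List.pySetD dp i (PySem.List.pySetD (PySem.List.pyGetD dp i []) j v)

def edit_distance_A (word1 word2 : List Char) : Int :=
  let m : Int := word1.length
  let n : Int := word2.length
  let dp0 : List (List Int) :=
    (PySem.List.pyRange 0 (m + 1) 1).map (fun _ => (PySem.List.pyRange 0 (n + 1) 1).map (fun _ => (0 : Int)))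
  let dp := (PySem.List.pyRange 0 (m + 1) 1).foldl (fun dp i =>
    (PySem.List.pyRange 0 (n + 1) 1).foldl (fun dp j =>
      let v : Int :=
        if i = 0 then j
        else if j = 0 then i
        else if PySem.List.pyGetD word1 (i - 1) ' ' = PySem.List.pyGetD word2 (j - 1) ' ' then
          pvGet2 dp (i - 1) (j - 1)
        else
          1 + min (pvGet2 dp (i - 1) j) (min (pvGet2 dp i (j - 1)) (pvGet2 dp (i - 1) (j - 1)))
      pvSet2 dp i j v) dp) dp0
  pvGet2 dp m n

def sentence_alignment_cost (sent1 : String) (sent2 : String) : Int :=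
  let words1 := PySem.Chars.splitOn sent1.toList [' ']
  let words2 := PySem.Chars.splitOn sent2.toList [' ']
  let n : Int := words1.length
  let m : Int := words2.length
  let dp0 : List (List Int) :=
    (PySem.List.pyRange 0 (m + 1) 1).map (fun _ => (PySem.List.pyRange 0 (n + 1) 1).map (fun _ => (0 : Int)))
  let dp := (PySem.List.pyRange 0 (m + 1) 1).foldl (fun dp i =>
    (PySem.List.pyRange 0 (n + 1) 1).foldl (fun dp j =>
      let v : Int :=
        if i = 0 ∧ j = 0 then 0
        else if i = 0 then
          pvGet2 dp i (j - 1) + ((PySem.List.pyGetD words1 (j - 1) []).length : Int)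
        else if j = 0 then
          pvGet2 dp (i - 1) j + ((PySem.List.pyGetD words2 (i - 1) []).length : Int)
        else
          let costSub := pvGet2 dp (i - 1) (j - 1) +
            edit_distance_A (PySem.List.pyGetD words2 (i - 1) []) (PySem.List.pyGetD words1 (j - 1) [])
          let costDelW2 := pvGet2 dp (i - 1) j + ((PySem.List.pyGetD words2 (i - 1) []).length : Int)
          let costDelW1 := pvGet2 dp i (j - 1) + ((PySem.List.pyGetD words1 (j - 1) []).length : Int)
          min costSub (min costDelW2 costDelW1)
      pvSet2 dp i j v) dp) dp0
  pvGet2 dp m n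

-- ===== PORT B =====
-- go(i, j) of Source B's edit_distance: top-down recursion with memo dict keyed by (i, j);
-- the dict is threaded through explicitly (Python mutates the closure's memo in place).
def edGo (word1 word2 : List Char) :
    Nat → Nat → PySem.Dict (Int × Int) Int → Int × PySem.Dict (Int × Int) Int
  | 0, j, memo => ((j : Int), memo)
  | i+1, 0, memo => (((i : Int) + 1), memo)
  | i+1, j+1, memo =>
    match memo.get? (((i : Int) + 1), ((j : Int) + 1)) with
    | some v => (v, memo)
    | none =>
      let r :=
        if PySem.List.pyGetD word1 ((i : Int)) ' ' = PySem.List.pyGetD word2 ((j : Int)) ' ' then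
          edGo word1 word2 i j memo
        else
          let r1 := edGo word1 word2 i (j+1) memo
          let r2 := edGo word1 word2 (i+1) j r1.2
          let r3 := edGo word1 word2 i j r2.2
          (1 + min r1.1 (min r2.1 r3.1), r3.2)
      (r.1, r.2.insert (((i : Int) + 1), ((j : Int) + 1)) r.1)
termination_by i j _ => i + j

def edit_distance_B (word1 word2 : List Char) : Int :=
  (edGo word1 word2 word1.length word2.length PySem.Dict.empty).1

-- solve(i, j) of Source B's sentence_alignment_cost, same memoization scheme
def saGo (words1 words2 : List (List Char)) :
    Nat → Nat → PySem.Dict (Int × Int) Int → Int × PySem.Dict (Int × Int) Int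
  | 0, 0, memo => (0, memo)
  | 0, j+1, memo =>
    match memo.get? ((0 : Int), ((j : Int) + 1)) with
    | some v => (v, memo)
    | none =>
      let r := saGo words1 words2 0 j memo
      let res := r.1 + ((PySem.List.pyGetD words1 ((j : Int)) []).length : Int)
      (res, r.2.insert ((0 : Int), ((j : Int) + 1)) res)
  | i+1, 0, memo =>
    match memo.get? (((i : Int) + 1), (0 : Int)) with
    | some v => (v, memo)
    | none =>
      let r := saGo words1 words2 i 0 memo
      let res := r.1 + ((PySem.List.pyGetD words2 ((i : Int)) []).length : Int)
      (res, r.2.insert (((i : Int) + 1), (0 : Int)) res)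
  | i+1, j+1, memo =>
    match memo.get? (((i : Int) + 1), ((j : Int) + 1)) with
    | some v => (v, memo)
    | none =>
      let r1 := saGo words1 words2 i j memo
      let c1 := r1.1 + edit_distance_B (PySem.List.pyGetD words2 ((i : Int)) [])
                        (PySem.List.pyGetD words1 ((j : Int)) [])
      let r2 := saGo words1 words2 i (j+1) r1.2
      let c2 := r2.1 + ((PySem.List.pyGetD words2 ((i : Int)) []).length : Int)
      let r3 := saGo words1 words2 (i+1) j r2.2
      let c3 := r3.1 + ((PySem.List.pyGetD words1 ((j : Int)) []).length : Int)
      let res := min c1 (min c2 c3)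
      (res, r3.2.insert (((i : Int) + 1), ((j : Int) + 1)) res)
termination_by i j _ => i + j

def sentence_alignment_cost_alt (sent1 : String) (sent2 : String) : Int :=
  let words1 := PySem.Chars.splitOn sent1.toList [' ']
  let words2 := PySem.Chars.splitOn sent2.toList [' ']
  (saGo words1 words2 words2.length words1.length PySem.Dict.empty).1

-- ===== PRECONDITION & SPEC =====
def Spec_sentence_alignment_cost (sent1 : String) (sent2 : String) (out : Int) : Prop := out = sentence_alignment_cost_alt sent1 sent2
instance (sent1 : String) (sent2 : String) (out : Int) : Decidable (Spec_sentence_alignment_cost sent1 sent2 out) := by unfold Spec_sentence_alignment_cost; infer_instance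

-- ===== CLAIM (what is proved, stated in full; the proofs are below) =====
def Claim_equal_sentence_alignment_cost : Prop := ∀ (sent1 : String) (sent2 : String), Dom_sentence_alignment_cost sent1 sent2 → Spec_sentence_alignment_cost sent1 sent2 (sentence_alignment_cost sent1 sent2)

-- ===== LEMMAS AND PROOFS =====

def Eed (w1 w2 : List Char) : Nat → Nat → Int
  | 0, j => (j : Int)
  | (i+1), 0 => (i : Int) + 1
  | (i+1), (j+1) =>
      if w1.getD i ' ' = w2.getD j ' ' then Eed w1 w2 i j
      else 1 + min (Eed w1 w2 i (j+1)) (min (Eed w1 w2 (i+1) j) (Eed w1 w2 i j))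
termination_by i j => i + j

def EDfull (a b : List Char) : Int := Eed a b a.length b.length

def Esent (ws1 ws2 : List (List Char)) : Nat → Nat → Int
  | 0, 0 => 0
  | 0, (j+1) => Esent ws1 ws2 0 j + ((ws1.getD j []).length : Int)
  | (i+1), 0 => Esent ws1 ws2 i 0 + ((ws2.getD i []).length : Int)
  | (i+1), (j+1) =>
      min (Esent ws1 ws2 i j + EDfull (ws2.getD i []) (ws1.getD j []))
        (min (Esent ws1 ws2 i (j+1) + ((ws2.getD i []).length : Int))
             (Esent ws1 ws2 (i+1) j + ((ws1.getD j []).length : Int)))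
termination_by i j => i + j

-- ===== A-side: the nested-loop matrix fill computes Eed / Esent =====

lemma pv_fold_range_aux {β : Type} (V : Nat → β) (f : β → Int → β) :
    ∀ (len s : Nat),
      (∀ t, s ≤ t → t < s + len → f (V t) ((t : Nat) : Int) = V (t + 1)) →
      (PySem.List.pyRange (s : Int) ((s : Int) + (len : Int)) 1).foldl f (V s) = V (s + len) := by
  intro len
  induction len with
  | zero => intro s _; simp [PySem.List.pyRange_one_eq_nil]
  | succ k ih =>
      intro s h
      rw [PySem.List.pyRange_one_cons (by push_cast; omega), List.foldl_cons,
        h s le_rfl (by omega)]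
      have harg2 : ((s : Int) + ((k + 1 : Nat) : Int)) = ((s + 1 : Nat) : Int) + (k : Int) := by push_cast; ring
      rw [harg2]
      have := ih (s + 1) (fun t ht1 ht2 => h t (by omega) (by omega))
      simpa [Nat.add_assoc, Nat.add_comm 1 k, Nat.add_left_comm] using this

lemma pv_fold_range0 {β : Type} (V : Nat → β) (f : β → Int → β) (len : Nat)
    (h : ∀ t, t < len → f (V t) ((t : Nat) : Int) = V (t + 1)) :
    (PySem.List.pyRange 0 ((len : Int)) 1).foldl f (V 0) = V len := by
  have := pv_fold_range_aux V f len 0 (fun t _ ht => h t (by omega))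
  simpa using this

lemma pv_getD_map_range {β : Type} (f : Nat → β) (k t : Nat) (d : β) (h : t < k) :
    ((List.range k).map f).getD t d = f t := by
  rw [List.getD_eq_getElem?_getD]
  simp [h]

lemma pv_map_range_congr {β : Type} (k : Nat) (f g : Nat → β) (h : ∀ c, c < k → f c = g c) :
    (List.range k).map f = (List.range k).map g :=
  List.map_congr_left fun c hc => h c (List.mem_range.mp hc)

lemma pv_set_map_range {β : Type} (f : Nat → β) (k t : Nat) (v : β) :
    ((List.range k).map f).set t v = (List.range k).map (fun c => if c = t then v else f c) := by
  apply List.ext_getElem (by simp)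
  intro i h1 h2
  simp only [List.getElem_set, List.getElem_map, List.getElem_range]
  by_cases h3 : t = i <;> simp [h3, eq_comm]

def pvZ (n : Nat) : List Int := (List.range (n + 1)).map (fun _ => 0)

def pvProw (g : Nat → Nat → Int) (n i j : Nat) : List Int :=
  (List.range (n + 1)).map (fun c => if c < j then g i c else 0)

def pvW (g : Nat → Nat → Int) (m n i j : Nat) : List (List Int) :=
  (List.range (m + 1)).map (fun r =>
    if r < i then (List.range (n + 1)).map (g r)
    else if r = i then pvProw g n i j else pvZ n)

lemma pvGet2_W_prev (g : Nat → Nat → Int) (m n i j r c : Nat)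
    (hr : r < i) (hrm : r ≤ m) (hc : c ≤ n) :
    pvGet2 (pvW g m n i j) ((r : Nat) : Int) ((c : Nat) : Int) = g r c := by
  unfold pvGet2 pvW
  simp only [PySem.List.pyGetD_natCast]
  rw [pv_getD_map_range _ _ _ _ (by omega), if_pos hr, pv_getD_map_range _ _ _ _ (by omega)]

lemma pvGet2_W_cur (g : Nat → Nat → Int) (m n i j c : Nat)
    (him : i ≤ m) (hc : c < j) (hcn : c ≤ n) :
    pvGet2 (pvW g m n i j) ((i : Nat) : Int) ((c : Nat) : Int) = g i c := by
  unfold pvGet2 pvW pvProw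
  simp only [PySem.List.pyGetD_natCast]
  rw [pv_getD_map_range _ _ _ _ (by omega), if_neg (by omega), if_pos rfl,
    pv_getD_map_range _ _ _ _ (by omega), if_pos hc]

lemma pvSet2_W (g : Nat → Nat → Int) (m n i j : Nat) (him : i ≤ m) (hj : j ≤ n) (v : Int)
    (hv : v = g i j) :
    pvSet2 (pvW g m n i j) ((i : Nat) : Int) ((j : Nat) : Int) v = pvW g m n i (j + 1) := by
  unfold pvSet2
  conv_lhs => rw [pvW]
  simp only [PySem.List.pyGetD_natCast, PySem.List.pySetD_natCast]
  rw [pv_getD_map_range _ _ _ _ (by omega), if_neg (by omega), if_pos rfl]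
  unfold pvProw
  rw [pv_set_map_range, pv_set_map_range]
  rw [pvW]
  apply pv_map_range_congr
  intro r hr
  by_cases h1 : r = i
  · subst h1
    rw [if_pos rfl, if_neg (by omega), if_pos rfl]
    unfold pvProw
    apply pv_map_range_congr
    intro c hc
    by_cases h2 : c = j
    · subst h2; simp [hv]
    · by_cases h3 : c < j
      · rw [if_neg h2, if_pos h3, if_pos (by omega)]
      · rw [if_neg h2, if_neg h3, if_neg (by omega)]
  · by_cases h2 : r < i <;> simp [h1, h2]

lemma pvW_succ_row (g : Nat → Nat → Int) (m n i : Nat) :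
    pvW g m n i (n + 1) = pvW g m n (i + 1) 0 := by
  unfold pvW
  apply pv_map_range_congr
  intro r hr
  by_cases h1 : r < i
  · rw [if_pos h1, if_pos (by omega)]
  · by_cases h2 : r = i
    · subst h2
      rw [if_neg h1, if_pos rfl, if_pos (by omega)]
      unfold pvProw
      apply pv_map_range_congr
      intro c hc
      rw [if_pos (by omega)]
    · by_cases h3 : r = i + 1
      · subst h3
        rw [if_neg h1, if_neg h2, if_neg (by omega), if_pos rfl]
        unfold pvProw pvZ
        apply pv_map_range_congr
        intro c hc
        rw [if_neg (by omega)]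
      · rw [if_neg h1, if_neg h2, if_neg (by omega), if_neg h3]

lemma pv_matrix_fold (g : Nat → Nat → Int) (m n : Nat)
    (cell : List (List Int) → Int → Int → Int)
    (hcell : ∀ i j, i ≤ m → j ≤ n →
      cell (pvW g m n i j) ((i : Nat) : Int) ((j : Nat) : Int) = g i j) :
    (PySem.List.pyRange 0 (((m + 1 : Nat)) : Int) 1).foldl (fun dp i =>
      (PySem.List.pyRange 0 (((n + 1 : Nat)) : Int) 1).foldl
        (fun dp j => pvSet2 dp i j (cell dp i j)) dp)
      (pvW g m n 0 0)
    = pvW g m n (m + 1) 0 := by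
  have := pv_fold_range0 (fun i => pvW g m n i 0)
    (fun dp i => (PySem.List.pyRange 0 (((n + 1 : Nat)) : Int) 1).foldl
      (fun dp j => pvSet2 dp i j (cell dp i j)) dp) (m + 1) ?_
  · exact this
  · intro i hi
    simp only
    have hin := pv_fold_range0 (fun j => pvW g m n i j)
      (fun dp j => pvSet2 dp ((i : Nat) : Int) j (cell dp ((i : Nat) : Int) j)) (n + 1) ?_
    · rw [hin, pvW_succ_row]
    · intro j hj
      simp only
      rw [hcell i j (by omega) (by omega), pvSet2_W g m n i j (by omega) (by omega) _ rfl]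

lemma Eed_zero (w1 w2 : List Char) (j : Nat) : Eed w1 w2 0 j = (j : Int) := by rw [Eed]

lemma pv_dp0 (g : Nat → Nat → Int) (m n : Nat) :
    (PySem.List.pyRange 0 (((m + 1 : Nat)) : Int) 1).map
      (fun _ => (PySem.List.pyRange 0 (((n + 1 : Nat)) : Int) 1).map (fun _ => (0 : Int)))
    = pvW g m n 0 0 := by
  apply List.ext_getElem
  · simp [pvW, PySem.List.length_pyRange_one]
  · intro idx h1 h2
    simp only [List.getElem_map, pvW, List.getElem_range]
    rw [if_neg (by omega)]
    by_cases h3 : idx = 0 <;> [rw [if_pos h3]; rw [if_neg h3]] <;>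
    · apply List.ext_getElem
      · simp [pvProw, pvZ, PySem.List.length_pyRange_one]
      · intro c hc1 hc2
        simp [pvProw, pvZ]

lemma edA_eq (w1 w2 : List Char) : edit_distance_A w1 w2 = EDfull w1 w2 := by
  have hcell : ∀ i j, i ≤ w1.length → j ≤ w2.length →
      (fun (dp : List (List Int)) (i j : Int) =>
        if i = 0 then j
        else if j = 0 then i
        else if PySem.List.pyGetD w1 (i - 1) ' ' = PySem.List.pyGetD w2 (j - 1) ' ' then
          pvGet2 dp (i - 1) (j - 1)
        else 1 + min (pvGet2 dp (i - 1) j) (min (pvGet2 dp i (j - 1)) (pvGet2 dp (i - 1) (j - 1))))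
        (pvW (Eed w1 w2) w1.length w2.length i j) ((i : Nat) : Int) ((j : Nat) : Int)
      = Eed w1 w2 i j := by
    intro i j hi hj
    simp only
    rcases i with _ | i'
    · rw [if_pos (by norm_num), Eed_zero]
    · rcases j with _ | j'
      · rw [if_neg (by omega), if_pos (by norm_num), Eed]
        push_cast; ring
      · have e1 : ((i' + 1 : Nat) : Int) - 1 = ((i' : Nat) : Int) := by push_cast; ring
        have e2 : ((j' + 1 : Nat) : Int) - 1 = ((j' : Nat) : Int) := by push_cast; ring
        rw [if_neg (by omega), if_neg (by omega), e1, e2,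
          PySem.List.pyGetD_natCast, PySem.List.pyGetD_natCast,
          pvGet2_W_prev _ _ _ _ _ i' (j' + 1) (by omega) (by omega) (by omega),
          pvGet2_W_cur _ _ _ _ _ j' (by omega) (by omega) (by omega),
          pvGet2_W_prev _ _ _ _ _ i' j' (by omega) (by omega) (by omega),
          Eed]
  unfold edit_distance_A
  dsimp only
  have hb1 : ((w1.length : Int) + 1) = ((w1.length + 1 : Nat) : Int) := by push_cast; ring
  have hb2 : ((w2.length : Int) + 1) = ((w2.length + 1 : Nat) : Int) := by push_cast; ring
  simp only [hb1, hb2]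
  rw [pv_dp0 (Eed w1 w2) w1.length w2.length]
  have h := pv_matrix_fold (Eed w1 w2) w1.length w2.length
    (fun dp i j =>
        if i = 0 then j
        else if j = 0 then i
        else if PySem.List.pyGetD w1 (i - 1) ' ' = PySem.List.pyGetD w2 (j - 1) ' ' then
          pvGet2 dp (i - 1) (j - 1)
        else 1 + min (pvGet2 dp (i - 1) j) (min (pvGet2 dp i (j - 1)) (pvGet2 dp (i - 1) (j - 1))))
    hcell
  beta_reduce at h
  rw [h, pvGet2_W_prev _ _ _ _ _ w1.length w2.length (by omega) le_rfl le_rfl]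
  rfl

lemma sentA_eq (sent1 sent2 : String) :
    sentence_alignment_cost sent1 sent2
      = Esent (PySem.Chars.splitOn sent1.toList [' ']) (PySem.Chars.splitOn sent2.toList [' '])
          (PySem.Chars.splitOn sent2.toList [' ']).length
          (PySem.Chars.splitOn sent1.toList [' ']).length := by
  set ws1 := PySem.Chars.splitOn sent1.toList [' '] with hws1
  set ws2 := PySem.Chars.splitOn sent2.toList [' '] with hws2
  have hcell : ∀ i j, i ≤ ws2.length → j ≤ ws1.length →
      (fun (dp : List (List Int)) (i j : Int) =>
        if i = 0 ∧ j = 0 then 0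
        else if i = 0 then
          pvGet2 dp i (j - 1) + ((PySem.List.pyGetD ws1 (j - 1) []).length : Int)
        else if j = 0 then
          pvGet2 dp (i - 1) j + ((PySem.List.pyGetD ws2 (i - 1) []).length : Int)
        else
          min (pvGet2 dp (i - 1) (j - 1) +
              edit_distance_A (PySem.List.pyGetD ws2 (i - 1) []) (PySem.List.pyGetD ws1 (j - 1) []))
            (min (pvGet2 dp (i - 1) j + ((PySem.List.pyGetD ws2 (i - 1) []).length : Int))
                 (pvGet2 dp i (j - 1) + ((PySem.List.pyGetD ws1 (j - 1) []).length : Int))))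
        (pvW (Esent ws1 ws2) ws2.length ws1.length i j) ((i : Nat) : Int) ((j : Nat) : Int)
      = Esent ws1 ws2 i j := by
    intro i j hi hj
    simp only
    rcases i with _ | i'
    · rcases j with _ | j'
      · rw [if_pos (by norm_num), Esent]
      · have e2 : ((j' + 1 : Nat) : Int) - 1 = ((j' : Nat) : Int) := by push_cast; ring
        rw [if_neg (by push_cast; omega), if_pos (by norm_num), e2,
          PySem.List.pyGetD_natCast,
          pvGet2_W_cur _ _ _ _ _ j' (by omega) (by omega) (by omega), Esent]
    · rcases j with _ | j'
      · have e1 : ((i' + 1 : Nat) : Int) - 1 = ((i' : Nat) : Int) := by push_cast; ring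
        rw [if_neg (by push_cast; omega), if_neg (by push_cast; omega), if_pos (by norm_num), e1,
          PySem.List.pyGetD_natCast,
          pvGet2_W_prev _ _ _ _ _ i' 0 (by omega) (by omega) (by omega), Esent]
      · have e1 : ((i' + 1 : Nat) : Int) - 1 = ((i' : Nat) : Int) := by push_cast; ring
        have e2 : ((j' + 1 : Nat) : Int) - 1 = ((j' : Nat) : Int) := by push_cast; ring
        rw [if_neg (by push_cast; omega), if_neg (by push_cast; omega), if_neg (by push_cast; omega),
          e1, e2, PySem.List.pyGetD_natCast, PySem.List.pyGetD_natCast,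
          pvGet2_W_prev _ _ _ _ _ i' (j' + 1) (by omega) (by omega) (by omega),
          pvGet2_W_cur _ _ _ _ _ j' (by omega) (by omega) (by omega),
          pvGet2_W_prev _ _ _ _ _ i' j' (by omega) (by omega) (by omega),
          edA_eq, Esent]
  unfold sentence_alignment_cost
  rw [← hws1, ← hws2]
  dsimp only
  have hb1 : ((ws2.length : Int) + 1) = ((ws2.length + 1 : Nat) : Int) := by push_cast; ring
  have hb2 : ((ws1.length : Int) + 1) = ((ws1.length + 1 : Nat) : Int) := by push_cast; ring
  simp only [hb1, hb2]
  rw [pv_dp0 (Esent ws1 ws2) ws2.length ws1.length]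
  have h := pv_matrix_fold (Esent ws1 ws2) ws2.length ws1.length
    (fun dp i j =>
        if i = 0 ∧ j = 0 then 0
        else if i = 0 then
          pvGet2 dp i (j - 1) + ((PySem.List.pyGetD ws1 (j - 1) []).length : Int)
        else if j = 0 then
          pvGet2 dp (i - 1) j + ((PySem.List.pyGetD ws2 (i - 1) []).length : Int)
        else
          min (pvGet2 dp (i - 1) (j - 1) +
              edit_distance_A (PySem.List.pyGetD ws2 (i - 1) []) (PySem.List.pyGetD ws1 (j - 1) []))
            (min (pvGet2 dp (i - 1) j + ((PySem.List.pyGetD ws2 (i - 1) []).length : Int))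
                 (pvGet2 dp i (j - 1) + ((PySem.List.pyGetD ws1 (j - 1) []).length : Int))))
    hcell
  beta_reduce at h
  rw [h, pvGet2_W_prev _ _ _ _ _ ws2.length ws1.length (by omega) le_rfl le_rfl]

-- ===== B-side: the memoized recursions compute Eed / Esent =====
-- cache invariant: every stored value is the spec value of its (nonnegative) key pair
def pvGoodE (w1 w2 : List Char) (d : PySem.Dict (Int × Int) Int) : Prop :=
  ∀ (i j : Nat) (v : Int), d.get? (((i : Nat) : Int), ((j : Nat) : Int)) = some v → v = Eed w1 w2 i j

def pvGoodS (ws1 ws2 : List (List Char)) (d : PySem.Dict (Int × Int) Int) : Prop :=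
  ∀ (i j : Nat) (v : Int), d.get? (((i : Nat) : Int), ((j : Nat) : Int)) = some v → v = Esent ws1 ws2 i j

lemma pvGoodE_insert (w1 w2 : List Char) (d : PySem.Dict (Int × Int) Int)
    (hd : pvGoodE w1 w2 d) (i j : Nat) (v : Int) (hv : v = Eed w1 w2 i j) :
    pvGoodE w1 w2 (d.insert (((i : Nat) : Int), ((j : Nat) : Int)) v) := by
  intro i' j' v' h
  rw [PySem.Dict.get?_insert] at h
  split_ifs at h with hk
  · have h1 : i' = i ∧ j' = j := by
      constructor <;> [have := congrArg Prod.fst hk; have := congrArg Prod.snd hk] <;>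
        simp at this <;> omega
    obtain ⟨rfl, rfl⟩ := h1
    cases h; exact hv
  · exact hd i' j' v' h

lemma pvGoodS_insert (ws1 ws2 : List (List Char)) (d : PySem.Dict (Int × Int) Int)
    (hd : pvGoodS ws1 ws2 d) (i j : Nat) (v : Int) (hv : v = Esent ws1 ws2 i j) :
    pvGoodS ws1 ws2 (d.insert (((i : Nat) : Int), ((j : Nat) : Int)) v) := by
  intro i' j' v' h
  rw [PySem.Dict.get?_insert] at h
  split_ifs at h with hk
  · have h1 : i' = i ∧ j' = j := by
      constructor <;> [have := congrArg Prod.fst hk; have := congrArg Prod.snd hk] <;>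
        simp at this <;> omega
    obtain ⟨rfl, rfl⟩ := h1
    cases h; exact hv
  · exact hd i' j' v' h

lemma edGo_good (w1 w2 : List Char) :
    ∀ (n i j : Nat), i + j ≤ n → ∀ (d : PySem.Dict (Int × Int) Int), pvGoodE w1 w2 d →
      (edGo w1 w2 i j d).1 = Eed w1 w2 i j ∧ pvGoodE w1 w2 (edGo w1 w2 i j d).2 := by
  intro n
  induction n with
  | zero =>
      intro i j hij d hd
      obtain ⟨rfl, rfl⟩ : i = 0 ∧ j = 0 := by omega
      rw [edGo, Eed]
      exact ⟨rfl, hd⟩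
  | succ k ih =>
      intro i j hij d hd
      rcases i with _ | i'
      · rw [edGo, Eed]; exact ⟨rfl, hd⟩
      · rcases j with _ | j'
        · rw [edGo, Eed]
          exact ⟨rfl, hd⟩
        · rw [edGo]
          rcases hlook : d.get? (((i' : Int) + 1), ((j' : Int) + 1)) with _ | v
          · simp only
            by_cases hc : PySem.List.pyGetD w1 ((i' : Int)) ' ' = PySem.List.pyGetD w2 ((j' : Int)) ' '
            · rw [if_pos hc]
              obtain ⟨h1, h2⟩ := ih i' j' (by omega) d hd
              have hcc : w1.getD i' ' ' = w2.getD j' ' ' := by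
                rwa [PySem.List.pyGetD_natCast, PySem.List.pyGetD_natCast] at hc
              have hval : (edGo w1 w2 i' j' d).1 = Eed w1 w2 (i' + 1) (j' + 1) := by
                rw [h1, Eed, if_pos hcc]
              refine ⟨hval, ?_⟩
              have := pvGoodE_insert w1 w2 (edGo w1 w2 i' j' d).2 h2 (i' + 1) (j' + 1)
                (edGo w1 w2 i' j' d).1 (by rw [hval])
              simpa [Nat.cast_add, Nat.cast_one] using this
            · rw [if_neg hc]
              have hcc : ¬ (w1.getD i' ' ' = w2.getD j' ' ') := by
                rwa [PySem.List.pyGetD_natCast, PySem.List.pyGetD_natCast] at hc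
              obtain ⟨h11, h12⟩ := ih i' (j' + 1) (by omega) d hd
              obtain ⟨h21, h22⟩ := ih (i' + 1) j' (by omega) _ h12
              obtain ⟨h31, h32⟩ := ih i' j' (by omega) _ h22
              simp only
              set v1 := (edGo w1 w2 i' (j' + 1) d).1
              set v2 := (edGo w1 w2 (i' + 1) j' (edGo w1 w2 i' (j' + 1) d).2).1
              set v3 := (edGo w1 w2 i' j' (edGo w1 w2 (i' + 1) j' (edGo w1 w2 i' (j' + 1) d).2).2).1
              have hval : 1 + min v1 (min v2 v3) = Eed w1 w2 (i' + 1) (j' + 1) := by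
                rw [h11, h21, h31, Eed, if_neg hcc]
              refine ⟨hval, ?_⟩
              have := pvGoodE_insert w1 w2 _ h32 (i' + 1) (j' + 1) _ hval
              simpa [Nat.cast_add, Nat.cast_one] using this
          · simp only
            have hkey : (((i' : Int) + 1), ((j' : Int) + 1))
                = ((((i' + 1 : Nat)) : Int), (((j' + 1 : Nat)) : Int)) := by push_cast; rfl
            refine ⟨hd (i' + 1) (j' + 1) v (by rw [← hkey]; exact hlook), hd⟩

lemma edB_eq (w1 w2 : List Char) : edit_distance_B w1 w2 = EDfull w1 w2 := by
  unfold edit_distance_B EDfull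
  exact (edGo_good w1 w2 (w1.length + w2.length) w1.length w2.length le_rfl
    PySem.Dict.empty (fun i j v h => by simp [PySem.Dict.get?_empty] at h)).1

lemma saGo_good (ws1 ws2 : List (List Char)) :
    ∀ (n i j : Nat), i + j ≤ n → ∀ (d : PySem.Dict (Int × Int) Int), pvGoodS ws1 ws2 d →
      (saGo ws1 ws2 i j d).1 = Esent ws1 ws2 i j ∧ pvGoodS ws1 ws2 (saGo ws1 ws2 i j d).2 := by
  intro n
  induction n with
  | zero =>
      intro i j hij d hd
      obtain ⟨rfl, rfl⟩ : i = 0 ∧ j = 0 := by omega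
      rw [saGo, Esent]
      exact ⟨rfl, hd⟩
  | succ k ih =>
      intro i j hij d hd
      rcases i with _ | i'
      · rcases j with _ | j'
        · rw [saGo, Esent]; exact ⟨rfl, hd⟩
        · rw [saGo]
          rcases hlook : d.get? ((0 : Int), ((j' : Int) + 1)) with _ | v
          · simp only
            obtain ⟨h1, h2⟩ := ih 0 j' (by omega) d hd
            have hval : (saGo ws1 ws2 0 j' d).1 + ((PySem.List.pyGetD ws1 ((j' : Int)) []).length : Int)
                = Esent ws1 ws2 0 (j' + 1) := by
              rw [h1, PySem.List.pyGetD_natCast, Esent]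
            refine ⟨hval, ?_⟩
            have := pvGoodS_insert ws1 ws2 _ h2 0 (j' + 1) _ hval
            simpa [Nat.cast_add, Nat.cast_one] using this
          · simp only
            have hkey : ((0 : Int), ((j' : Int) + 1))
                = ((((0 : Nat)) : Int), (((j' + 1 : Nat)) : Int)) := by push_cast; rfl
            exact ⟨hd 0 (j' + 1) v (by rw [← hkey]; exact hlook), hd⟩
      · rcases j with _ | j'
        · rw [saGo]
          rcases hlook : d.get? (((i' : Int) + 1), (0 : Int)) with _ | v
          · simp only
            obtain ⟨h1, h2⟩ := ih i' 0 (by omega) d hd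
            have hval : (saGo ws1 ws2 i' 0 d).1 + ((PySem.List.pyGetD ws2 ((i' : Int)) []).length : Int)
                = Esent ws1 ws2 (i' + 1) 0 := by
              rw [h1, PySem.List.pyGetD_natCast, Esent]
            refine ⟨hval, ?_⟩
            have := pvGoodS_insert ws1 ws2 _ h2 (i' + 1) 0 _ hval
            simpa [Nat.cast_add, Nat.cast_one] using this
          · simp only
            have hkey : (((i' : Int) + 1), (0 : Int))
                = ((((i' + 1 : Nat)) : Int), (((0 : Nat)) : Int)) := by push_cast; rfl
            exact ⟨hd (i' + 1) 0 v (by rw [← hkey]; exact hlook), hd⟩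
        · rw [saGo]
          rcases hlook : d.get? (((i' : Int) + 1), ((j' : Int) + 1)) with _ | v
          · simp only
            obtain ⟨h11, h12⟩ := ih i' j' (by omega) d hd
            obtain ⟨h21, h22⟩ := ih i' (j' + 1) (by omega) _ h12
            obtain ⟨h31, h32⟩ := ih (i' + 1) j' (by omega) _ h22
            set r1 := saGo ws1 ws2 i' j' d
            set r2 := saGo ws1 ws2 i' (j' + 1) r1.2
            set r3 := saGo ws1 ws2 (i' + 1) j' r2.2
            have hval : min (r1.1 + edit_distance_B (PySem.List.pyGetD ws2 ((i' : Int)) [])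
                              (PySem.List.pyGetD ws1 ((j' : Int)) []))
                  (min (r2.1 + ((PySem.List.pyGetD ws2 ((i' : Int)) []).length : Int))
                       (r3.1 + ((PySem.List.pyGetD ws1 ((j' : Int)) []).length : Int)))
                = Esent ws1 ws2 (i' + 1) (j' + 1) := by
              rw [h11, h21, h31, PySem.List.pyGetD_natCast, PySem.List.pyGetD_natCast, edB_eq, Esent]
            refine ⟨hval, ?_⟩
            have := pvGoodS_insert ws1 ws2 _ h32 (i' + 1) (j' + 1) _ hval
            simpa [Nat.cast_add, Nat.cast_one] using this
          · simp only
            have hkey : (((i' : Int) + 1), ((j' : Int) + 1))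
                = ((((i' + 1 : Nat)) : Int), (((j' + 1 : Nat)) : Int)) := by push_cast; rfl
            exact ⟨hd (i' + 1) (j' + 1) v (by rw [← hkey]; exact hlook), hd⟩

lemma sentB_eq (sent1 sent2 : String) :
    sentence_alignment_cost_alt sent1 sent2
      = Esent (PySem.Chars.splitOn sent1.toList [' ']) (PySem.Chars.splitOn sent2.toList [' '])
          (PySem.Chars.splitOn sent2.toList [' ']).length
          (PySem.Chars.splitOn sent1.toList [' ']).length := by
  set ws1 := PySem.Chars.splitOn sent1.toList [' '] with hws1
  set ws2 := PySem.Chars.splitOn sent2.toList [' '] with hws2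
  unfold sentence_alignment_cost_alt
  rw [← hws1, ← hws2]
  exact (saGo_good ws1 ws2 (ws2.length + ws1.length) ws2.length ws1.length le_rfl
    PySem.Dict.empty (fun i j v h => by simp [PySem.Dict.get?_empty] at h)).1

-- ===== VERDICT (by name: the statement is the Claim_ definition above) =====
theorem sentence_alignment_cost_spec : Claim_equal_sentence_alignment_cost := by
  intro sent1 sent2 _
  unfold Spec_sentence_alignment_cost
  rw [sentA_eq, sentB_eq]
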